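-- pv_equiv track=rewrite | github.com/unswit/COMP9021_2 | assignment/ass01/class.py | convert_first_roman_dict
-- ===== SOURCE A (Python) =====
-- def convert_first_roman_dict(input):
--     result = {}
--     if input:
--         start = 1
--         # IVXLCM
--         # I
--         # IV
--         # AB
--         # ABC
--         # abcdefghijklmnxyzAZF
--         for index in range(0,len(input),2):
--             result[input[index]] = start
--             if index + 1 < len(input):
--                 result[input[index] + input[index + 1]] = 4* start
--                 result[input[index + 1]] = 5* start
--             if index + 2 < len(input):
--                 result[input[index] + input[index + 2]] = 9 * start
--                 result[input[index + 2]] = 10 * start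
--             start = 10 *start
--         # reverse_result = {value:key for key,value in result.items()}
--     return result
-- ===== SOURCE B (Python) =====
-- def convert_first_roman_dict(input):
--     # One flat step-1 pass over the characters, branching on index parity;
--     # each key is written exactly once per position (no overlapping re-writes).
--     n = len(input)
--     result = {}
--     unit = 1
--     for i, ch in enumerate(input):
--         if i % 2 == 0:
--             result[ch] = unit
--             if i + 1 < n:
--                 result[ch + input[i + 1]] = 4 * unit
--         else:
--             result[ch] = 5 * unit
--             if i + 1 < n:
--                 result[input[i - 1] + input[i + 1]] = 9 * unit
--             unit *= 10
--     return result
-- ===== Notes on version B (the rewrite author's own statement) =====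
-- stated objective: simpler
-- what changed: Replaces the stride-2 loop that interleaves five dict assignments per iteration (re-writing the same position from two iterations) with a single step-1 pass over enumerate(input) that branches on index parity and writes each key exactly once per position.
import Mathlib
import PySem

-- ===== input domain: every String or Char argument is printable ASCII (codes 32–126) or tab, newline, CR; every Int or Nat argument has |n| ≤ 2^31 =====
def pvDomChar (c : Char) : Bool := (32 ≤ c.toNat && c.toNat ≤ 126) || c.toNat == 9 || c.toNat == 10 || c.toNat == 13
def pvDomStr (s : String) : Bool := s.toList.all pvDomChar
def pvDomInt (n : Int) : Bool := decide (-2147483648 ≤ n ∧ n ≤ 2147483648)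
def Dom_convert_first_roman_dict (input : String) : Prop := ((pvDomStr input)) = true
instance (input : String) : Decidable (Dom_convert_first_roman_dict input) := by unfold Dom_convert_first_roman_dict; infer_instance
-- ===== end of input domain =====

-- B replaces A's stride-2 loop with five interleaved dict assignments per iteration (re-writing
-- the same position from two consecutive iterations) by a single step-1 pass over enumerate(input)
-- branching on index parity, writing each key exactly once per position (simpler).

-- ===== PORT A =====
-- step of A's `for index in range(0, len(input), 2)` loop; state = (result, start)
def pvStepA (cs : List Char) (n : Int) (st : PySem.Dict String Int × Int) (index : Int) :
    PySem.Dict String Int × Int :=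
  let r1 := st.1.insert (String.ofList [PySem.List.pyGetD cs index '?']) st.2
  let r2 := if index + 1 < n then
      (r1.insert (String.ofList [PySem.List.pyGetD cs index '?', PySem.List.pyGetD cs (index + 1) '?'])
          (4 * st.2)).insert (String.ofList [PySem.List.pyGetD cs (index + 1) '?']) (5 * st.2)
    else r1
  let r3 := if index + 2 < n then
      (r2.insert (String.ofList [PySem.List.pyGetD cs index '?', PySem.List.pyGetD cs (index + 2) '?'])
          (9 * st.2)).insert (String.ofList [PySem.List.pyGetD cs (index + 2) '?']) (10 * st.2)
    else r2
  (r3, 10 * st.2)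

def convert_first_roman_dict (input : String) : List (String × Int) :=
  let cs := input.toList
  if cs = [] then []          -- `result = {}` returned unchanged when `if input:` is false
  else
    let n : Int := cs.length
    ((PySem.List.pyRange 0 n 2).foldl (pvStepA cs n) (PySem.Dict.empty, 1)).1.items

-- ===== PORT B =====
-- body of B's `for i, ch in enumerate(input)` loop; state = (result, unit)
def pvStepB (cs : List Char) (n : Int) (st : PySem.Dict String Int × Int) (p : Int × Char) :
    PySem.Dict String Int × Int :=
  if PySem.Int.mod p.1 2 = 0 then
    let r := st.1.insert (String.ofList [p.2]) st.2
    (if p.1 + 1 < n then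
        r.insert (String.ofList [p.2, PySem.List.pyGetD cs (p.1 + 1) '?']) (4 * st.2)
      else r, st.2)
  else
    let r := st.1.insert (String.ofList [p.2]) (5 * st.2)
    (if p.1 + 1 < n then
        r.insert (String.ofList [PySem.List.pyGetD cs (p.1 - 1) '?',
          PySem.List.pyGetD cs (p.1 + 1) '?']) (9 * st.2)
      else r, st.2 * 10)

def convert_first_roman_dict_alt (input : String) : List (String × Int) :=
  let cs := input.toList
  let n : Int := cs.length
  (((PySem.List.enumerate cs).foldl (pvStepB cs n) (PySem.Dict.empty, 1)).1).items

-- ===== PRECONDITION & SPEC =====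
def Spec_convert_first_roman_dict (input : String) (out : List (String × Int)) : Prop := out = convert_first_roman_dict_alt input
instance (input : String) (out : List (String × Int)) : Decidable (Spec_convert_first_roman_dict input out) := by unfold Spec_convert_first_roman_dict; infer_instance

-- ===== CLAIM (what is proved, stated in full; the proofs are below) =====
def Claim_equal_convert_first_roman_dict : Prop := ∀ (input : String), Dom_convert_first_roman_dict input → Spec_convert_first_roman_dict input (convert_first_roman_dict input)

-- ===== LEMMAS AND PROOFS =====

-- ghost: the sequence of dict assignments A performs on the suffix of the string, start = p
def pvPairsA : List Char → Int → List (String × Int)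
  | [], _ => []
  | [a], p => [(String.ofList [a], p)]
  | [a, b], p => [(String.ofList [a], p), (String.ofList [a, b], 4 * p), (String.ofList [b], 5 * p)]
  | a :: b :: c :: rest, p =>
      (String.ofList [a], p) :: (String.ofList [a, b], 4 * p) :: (String.ofList [b], 5 * p) ::
      (String.ofList [a, c], 9 * p) :: (String.ofList [c], 10 * p) :: pvPairsA (c :: rest) (10 * p)

-- ghost: the sequence of pairs B collects on the suffix, unit = p
def pvPairsB : List Char → Int → List (String × Int)
  | [], _ => []
  | [a], p => [(String.ofList [a], p)]
  | [a, b], p => [(String.ofList [a], p), (String.ofList [a, b], 4 * p), (String.ofList [b], 5 * p)]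
  | a :: b :: c :: rest, p =>
      (String.ofList [a], p) :: (String.ofList [a, b], 4 * p) :: (String.ofList [b], 5 * p) ::
      (String.ofList [a, c], 9 * p) :: pvPairsB (c :: rest) (10 * p)

def pvIns (d : PySem.Dict String Int) (q : String × Int) : PySem.Dict String Int :=
  d.insert q.1 q.2

lemma pvPyRange_two_cons (a b : Int) (h : a < b) :
    PySem.List.pyRange a b 2 = a :: PySem.List.pyRange (a + 2) b 2 := by
  rw [PySem.List.pyRange_of_pos a b (by norm_num), PySem.List.pyRange_of_pos (a+2) b (by norm_num)]
  have hc : ((b - a + 2 - 1) / 2).toNat = (if a + 2 < b then ((b - (a+2) + 2 - 1) / 2).toNat else 0) + 1 := by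
    split_ifs with h2 <;> omega
  rw [if_pos h, hc, List.range_succ_eq_map]
  simp [List.map_map, Function.comp]
  intro k hk; ring

lemma pvPyRange_two_nil (a b : Int) (h : b ≤ a) : PySem.List.pyRange a b 2 = [] := by
  rw [PySem.List.pyRange_of_pos a b (by norm_num), if_neg (by omega)]
  simp

-- full-list index = suffix index, shifted by the prefix length
lemma pvGetPS (pre ys : List Char) (j : Nat) :
    PySem.List.pyGetD (pre ++ ys) ((pre.length + j : Nat) : Int) '?' = ys.getD j '?' := by
  rw [PySem.List.pyGetD_natCast, List.getD, List.getD, List.getElem?_append_right (by omega)]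
  rw [Nat.add_sub_cancel_left]

lemma pvG0 (pre : List Char) (a : Char) (ys : List Char) :
    PySem.List.pyGetD (pre ++ a :: ys) ((pre.length : Int)) '?' = a := by
  have h := pvGetPS pre (a :: ys) 0; push_cast at h; simpa using h

lemma pvG1 (pre : List Char) (a b : Char) (ys : List Char) :
    PySem.List.pyGetD (pre ++ a :: b :: ys) ((pre.length : Int) + 1) '?' = b := by
  have h := pvGetPS pre (a :: b :: ys) 1; push_cast at h; simpa using h

lemma pvG2 (pre : List Char) (a b c : Char) (ys : List Char) :
    PySem.List.pyGetD (pre ++ a :: b :: c :: ys) ((pre.length : Int) + 2) '?' = c := by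
  have h := pvGetPS pre (a :: b :: c :: ys) 2; push_cast at h; simpa using h

-- folding pvPairsA over a dict that already holds the head assignment is the same
lemma pvFold_head_dup (c : Char) (rest : List Char) (q : Int) (d : PySem.Dict String Int) :
    (pvPairsA (c :: rest) q).foldl pvIns (pvIns d (String.ofList [c], q))
      = (pvPairsA (c :: rest) q).foldl pvIns d := by
  match rest with
  | [] => simp [pvPairsA, pvIns, PySem.Dict.insert_insert_self]
  | [b] => simp [pvPairsA, pvIns, PySem.Dict.insert_insert_self]
  | b :: c' :: r => simp [pvPairsA, pvIns, PySem.Dict.insert_insert_self]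

-- A's and B's assignment sequences build the same dict
lemma pvFoldAB : ∀ (cs : List Char) (p : Int) (d : PySem.Dict String Int),
    (pvPairsA cs p).foldl pvIns d = (pvPairsB cs p).foldl pvIns d := by
  intro cs p
  fun_induction pvPairsA cs p with
  | case1 p => intro d; rfl
  | case2 a p => intro d; rfl
  | case3 a b p => intro d; rfl
  | case4 a b c rest p ih =>
      intro d
      simp only [pvPairsB, List.foldl_cons]
      rw [pvFold_head_dup]
      exact ih _

-- A's loop over the index range computes the fold of pvPairsA over the suffix
lemma pvLoopA : ∀ (m : Nat) (suffix : List Char), suffix.length = m →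
    ∀ (pre : List Char) (d : PySem.Dict String Int) (p : Int),
    ((PySem.List.pyRange (pre.length : Int) ((pre.length + suffix.length : Nat) : Int) 2).foldl
        (pvStepA (pre ++ suffix) ((pre.length + suffix.length : Nat) : Int)) (d, p)).1
      = (pvPairsA suffix p).foldl pvIns d := by
  intro m
  induction m using Nat.strong_induction_on with
  | _ m ih =>
    intro suffix hm pre d p
    subst hm
    match suffix with
    | [] =>
        rw [pvPyRange_two_nil _ _ (by push_cast [List.length_cons, List.length_nil, List.length_append]; omega)]
        simp [pvPairsA]
    | [a] =>
        rw [pvPyRange_two_cons _ _ (by push_cast [List.length_cons, List.length_nil, List.length_append]; omega),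
            pvPyRange_two_nil _ _ (by push_cast [List.length_cons, List.length_nil, List.length_append]; omega)]
        simp only [List.foldl_cons, List.foldl_nil, pvStepA, pvPairsA, pvIns]
        rw [if_neg (by push_cast [List.length_cons, List.length_nil, List.length_append]; omega), if_neg (by push_cast [List.length_cons, List.length_nil, List.length_append]; omega), pvG0]
    | [a, b] =>
        rw [pvPyRange_two_cons _ _ (by push_cast [List.length_cons, List.length_nil, List.length_append]; omega),
            pvPyRange_two_nil _ _ (by push_cast [List.length_cons, List.length_nil, List.length_append]; omega)]
        simp only [List.foldl_cons, List.foldl_nil, pvStepA, pvPairsA, pvIns, List.foldl_cons]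
        rw [if_neg (by push_cast [List.length_cons, List.length_nil, List.length_append]; omega), if_pos (by push_cast [List.length_cons, List.length_nil, List.length_append]; omega), pvG0, pvG1]
    | a :: b :: c :: rest =>
        rw [pvPyRange_two_cons _ _ (by push_cast [List.length_cons, List.length_nil, List.length_append]; omega), List.foldl_cons]
        have hstep : pvStepA (pre ++ a :: b :: c :: rest)
            ((pre.length + (a :: b :: c :: rest).length : Nat) : Int) (d, p) ((pre.length : Int))
            = ((((((d.insert (String.ofList [a]) p).insert (String.ofList [a, b]) (4 * p)).insert
                  (String.ofList [b]) (5 * p)).insert (String.ofList [a, c]) (9 * p)).insert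
                  (String.ofList [c]) (10 * p)), 10 * p) := by
          simp only [pvStepA]
          rw [if_pos (by push_cast [List.length_cons, List.length_nil, List.length_append]; omega), if_pos (by push_cast [List.length_cons, List.length_nil, List.length_append]; omega),
              pvG0, pvG1, pvG2]
        rw [hstep]
        have hfull : pre ++ a :: b :: c :: rest = (pre ++ [a, b]) ++ c :: rest := by simp
        have hN : ((pre.length + (a :: b :: c :: rest).length : Nat) : Int)
            = (((pre ++ [a, b]).length + (c :: rest).length : Nat) : Int) := by
          simp <;> omega
        have hidx : ((pre.length : Int) + 2) = (((pre ++ [a, b]).length : Nat) : Int) := by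
          simp <;> omega
        rw [hfull, hN, hidx,
            ih ((c :: rest).length) (by simp <;> omega) (c :: rest) rfl (pre ++ [a, b]) _ (10 * p)]
        simp only [pvPairsA, List.foldl_cons, pvIns]

-- B's enumerate loop performs the pvPairsB insertions (suffix starting at an even absolute index)
lemma pvLoopB : ∀ (m : Nat) (suffix : List Char), suffix.length = m →
    ∀ (pre : List Char), pre.length % 2 = 0 → ∀ (d : PySem.Dict String Int) (u : Int),
    ((PySem.List.enumerate suffix (pre.length : Int)).foldl
        (pvStepB (pre ++ suffix) ((pre.length + suffix.length : Nat) : Int)) (d, u)).1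
      = (pvPairsB suffix u).foldl pvIns d := by
  intro m
  induction m using Nat.strong_induction_on with
  | _ m ih =>
    intro suffix hm pre hpre d u
    subst hm
    have hm0 : PySem.Int.mod ((pre.length : Nat) : Int) 2 = 0 := by
      rw [PySem.Int.mod_eq_emod_of_pos (by norm_num)]; omega
    have hm1 : ¬ PySem.Int.mod (((pre.length : Nat) : Int) + 1) 2 = 0 := by
      rw [PySem.Int.mod_eq_emod_of_pos (by norm_num)]; omega
    match suffix with
    | [] => simp [PySem.List.enumerate_nil, pvPairsB]
    | [a] =>
        rw [PySem.List.enumerate_cons, PySem.List.enumerate_nil]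
        have h1 : pvStepB (pre ++ [a]) ((pre.length + [a].length : Nat) : Int) (d, u)
            ((pre.length : Int), a) = (d.insert (String.ofList [a]) u, u) := by
          simp only [pvStepB]
          rw [if_pos hm0,
              if_neg (by push_cast [List.length_cons, List.length_nil, List.length_append]; omega)]
        rw [List.foldl_cons, h1, List.foldl_nil]
        simp [pvPairsB, pvIns]
    | [a, b] =>
        rw [PySem.List.enumerate_cons, PySem.List.enumerate_cons, PySem.List.enumerate_nil]
        have h1 : pvStepB (pre ++ [a, b]) ((pre.length + [a, b].length : Nat) : Int) (d, u)
            ((pre.length : Int), a)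
            = ((d.insert (String.ofList [a]) u).insert (String.ofList [a, b]) (4 * u), u) := by
          simp only [pvStepB]
          rw [if_pos hm0,
              if_pos (by push_cast [List.length_cons, List.length_nil, List.length_append]; omega),
              pvG1]
        have h2 : pvStepB (pre ++ [a, b]) ((pre.length + [a, b].length : Nat) : Int)
            ((d.insert (String.ofList [a]) u).insert (String.ofList [a, b]) (4 * u), u)
            ((pre.length : Int) + 1, b)
            = ((((d.insert (String.ofList [a]) u).insert (String.ofList [a, b]) (4 * u)).insert
                (String.ofList [b]) (5 * u)), u * 10) := by
          simp only [pvStepB]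
          rw [if_neg hm1,
              if_neg (by push_cast [List.length_cons, List.length_nil, List.length_append]; omega)]
        rw [List.foldl_cons, h1, List.foldl_cons, h2, List.foldl_nil]
        simp [pvPairsB, pvIns]
    | a :: b :: c :: rest =>
        rw [PySem.List.enumerate_cons, PySem.List.enumerate_cons, List.foldl_cons, List.foldl_cons]
        have h1 : pvStepB (pre ++ a :: b :: c :: rest)
            ((pre.length + (a :: b :: c :: rest).length : Nat) : Int) (d, u)
            ((pre.length : Int), a)
            = ((d.insert (String.ofList [a]) u).insert (String.ofList [a, b]) (4 * u), u) := by
          simp only [pvStepB]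
          rw [if_pos hm0,
              if_pos (by push_cast [List.length_cons, List.length_nil, List.length_append]; omega),
              pvG1]
        have h2 : pvStepB (pre ++ a :: b :: c :: rest)
            ((pre.length + (a :: b :: c :: rest).length : Nat) : Int)
            ((d.insert (String.ofList [a]) u).insert (String.ofList [a, b]) (4 * u), u)
            ((pre.length : Int) + 1, b)
            = (((((d.insert (String.ofList [a]) u).insert (String.ofList [a, b]) (4 * u)).insert
                (String.ofList [b]) (5 * u)).insert (String.ofList [a, c]) (9 * u)), u * 10) := by
          simp only [pvStepB]
          rw [if_neg hm1,
              if_pos (by push_cast [List.length_cons, List.length_nil, List.length_append]; omega)]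
          have hm2 : ((pre.length : Int) + 1 - 1) = ((pre.length : Int)) := by ring
          have hp2 : ((pre.length : Int) + 1 + 1) = ((pre.length : Int)) + 2 := by ring
          rw [hm2, hp2, pvG0, pvG2]
        rw [h1, h2]
        have hfull : pre ++ a :: b :: c :: rest = (pre ++ [a, b]) ++ c :: rest := by simp
        have hN : ((pre.length + (a :: b :: c :: rest).length : Nat) : Int)
            = (((pre ++ [a, b]).length + (c :: rest).length : Nat) : Int) := by
          simp <;> omega
        have hidx : ((pre.length : Int) + 1 + 1) = (((pre ++ [a, b]).length : Nat) : Int) := by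
          simp <;> omega
        rw [hfull, hN, hidx,
            ih ((c :: rest).length) (by simp <;> omega) (c :: rest) rfl (pre ++ [a, b])
              (by simp <;> omega) _ (u * 10)]
        have hc : u * 10 = 10 * u := mul_comm u 10
        rw [hc]
        simp only [pvPairsB, List.foldl_cons, pvIns]

-- ===== VERDICT (by name: the statement is the Claim_ definition above) =====
theorem convert_first_roman_dict_spec : Claim_equal_convert_first_roman_dict := by
  intro input _
  unfold Spec_convert_first_roman_dict convert_first_roman_dict convert_first_roman_dict_alt
  rcases h : input.toList with _ | ⟨a, cs⟩
  · rfl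
  · rw [if_neg (by simp)]
    show (List.foldl (pvStepA (a :: cs) (((a :: cs).length : Nat) : Int)) (PySem.Dict.empty, 1)
          (PySem.List.pyRange 0 (((a :: cs).length : Nat) : Int) 2)).1.items
        = (((PySem.List.enumerate (a :: cs)).foldl
            (pvStepB (a :: cs) (((a :: cs).length : Nat) : Int)) (PySem.Dict.empty, 1)).1).items
    have hA := pvLoopA (a :: cs).length (a :: cs) rfl [] PySem.Dict.empty 1
    simp only [List.nil_append, List.length_nil, Nat.cast_zero, Nat.zero_add] at hA
    rw [hA]
    have hB := pvLoopB (a :: cs).length (a :: cs) rfl [] rfl PySem.Dict.empty 1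
    simp only [List.nil_append, List.length_nil, Nat.cast_zero, Nat.zero_add] at hB
    rw [hB, pvFoldAB (a :: cs) 1 PySem.Dict.empty]
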